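-- pv_equiv track=rewrite | github.com/hazelybell/estimate-charm | unnaturalcode/testdata/launchpad/lib/lp/services/database/nl_search.py | _nl_phrase_search
-- ===== SOURCE A (Python) =====
-- def _nl_phrase_search(terms, table, constraints, extra_constraints_tables):
--     """Perform a very simple pruning of the phrase, letting fti do ranking.
--
--     This function groups the terms with & clause, and creates an additional
--     & grouping for each subset of terms created by discarding one term.
--
--     See nl_phrase_search for the contract of this function.
--     """
--     terms = set(terms)
--     # Special cased because in the two-term case there is no benefit by having
--     # a more complex rank & search function.
--     # sorted for doctesting convenience - should have no impact on tsearch2.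
--     if len(terms) < 3:
--         return '|'.join(sorted(terms))
--     # Expand
--     and_groups = [None] * (len(terms) + 1)
--     for pos in range(len(terms) + 1):
--         and_groups[pos] = set(terms)
--     # sorted for doctesting convenience - should have no impact on tsearch2.
--     for pos, term in enumerate(sorted(terms)):
--         and_groups[pos + 1].discard(term)
--     # sorted for doctesting convenience - should have no impact on tsearch2.
--     and_clauses = ['(' + '&'.join(sorted(group)) + ')'
--         for group in and_groups]
--     return '|'.join(and_clauses)
-- ===== SOURCE B (Python) =====
-- def _nl_phrase_search(terms, table, constraints, extra_constraints_tables):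
--     """Build the fti clause string: full '&' group of the distinct sorted terms
--     plus one leave-one-out '&' group per term, '|'-joined.  Each group string is
--     assembled in O(1) joins from running prefix and suffix join strings instead
--     of joining every group from scratch."""
--     st = sorted(set(terms))
--     if len(st) < 3:
--         return '|'.join(st)
--     # suffixes[i] == '&'.join(st[i:]); built back-to-front, one concat per step
--     suffixes = [st[-1]]
--     for t in reversed(st[:-1]):
--         suffixes.append(t + '&' + suffixes[-1])
--     suffixes.reverse()
--     clauses = ['(' + suffixes[0] + ')', '(' + suffixes[1] + ')']
--     prefix = st[0]
--     for i in range(1, len(st) - 1):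
--         clauses.append('(' + prefix + '&' + suffixes[i + 1] + ')')
--         prefix = prefix + '&' + st[i]
--     clauses.append('(' + prefix + ')')
--     return '|'.join(clauses)
-- ===== Notes on version B (the rewrite author's own statement) =====
-- stated objective: faster
-- what changed: B never materialises or re-sorts the n+1 groups: it sorts the distinct terms once, precomputes running suffix-join strings back to front and a running prefix-join string front to back, and emits each leave-one-out clause as a single prefix+'&'+suffix concatenation.
import Mathlib
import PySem

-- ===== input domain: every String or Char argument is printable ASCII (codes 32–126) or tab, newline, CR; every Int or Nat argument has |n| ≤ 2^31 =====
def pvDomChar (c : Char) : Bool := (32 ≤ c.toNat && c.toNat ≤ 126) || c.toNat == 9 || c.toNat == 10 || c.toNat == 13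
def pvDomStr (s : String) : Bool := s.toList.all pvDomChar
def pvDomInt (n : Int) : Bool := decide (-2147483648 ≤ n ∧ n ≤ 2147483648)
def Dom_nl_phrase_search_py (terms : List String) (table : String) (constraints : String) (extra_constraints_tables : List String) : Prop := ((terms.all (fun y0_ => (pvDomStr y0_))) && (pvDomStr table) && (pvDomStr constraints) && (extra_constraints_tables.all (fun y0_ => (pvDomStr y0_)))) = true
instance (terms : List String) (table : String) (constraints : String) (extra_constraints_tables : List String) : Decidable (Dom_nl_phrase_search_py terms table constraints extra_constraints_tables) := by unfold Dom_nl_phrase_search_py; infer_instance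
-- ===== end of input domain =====

-- B assembles every leave-one-out '&' group string from running prefix-join and suffix-join
-- strings (one concatenation per group) instead of copying the term set n+1 times, discarding
-- one element per copy and re-sorting and re-joining every group (objective: faster).


-- ===== PORT A =====
def nl_phrase_search_py (terms : List String) (table : String) (constraints : String) (extra_constraints_tables : List String) : String :=
  -- terms = set(terms)
  let termsS : PySem.Set String := PySem.Set.ofList terms
  -- if len(terms) < 3: return '|'.join(sorted(terms))
  if PySem.Set.len termsS < 3 then
    PySem.Str.join "|" (PySem.List.sorted termsS (fun x => x))
  else
    -- and_groups = [None] * (len(terms) + 1); for pos in range(...): and_groups[pos] = set(terms)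
    let and_groups : List (PySem.Set String) := List.replicate (termsS.length + 1) termsS
    -- for pos, term in enumerate(sorted(terms)): and_groups[pos + 1].discard(term)
    let and_groups :=
      (PySem.List.enumerate (PySem.List.sorted termsS (fun x => x))).foldl
        (fun gs pt =>
          PySem.List.pySetD gs (pt.1 + 1)
            (PySem.Set.discard (PySem.List.pyGetD gs (pt.1 + 1) []) pt.2))
        and_groups
    -- and_clauses = ['(' + '&'.join(sorted(group)) + ')' for group in and_groups]
    let and_clauses := and_groups.map
      (fun g => "(" ++ PySem.Str.join "&" (PySem.List.sorted g (fun x => x)) ++ ")")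
    PySem.Str.join "|" and_clauses

-- ===== PORT B =====
def nl_phrase_search_py_alt (terms : List String) (table : String) (constraints : String) (extra_constraints_tables : List String) : String :=
  -- st = sorted(set(terms))
  let st := PySem.List.sorted (PySem.Set.ofList terms) (fun x => x)
  -- if len(st) < 3: return '|'.join(st)
  if (st.length : Int) < 3 then
    PySem.Str.join "|" st
  else
    -- suffixes = [st[-1]]
    let suffixes : List String := [PySem.List.pyGetD st (-1) ""]
    -- for t in reversed(st[:-1]): suffixes.append(t + '&' + suffixes[-1])
    let suffixes := ((PySem.List.slice st none (some (-1))).reverse).foldl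
      (fun acc t => acc ++ [t ++ "&" ++ PySem.List.pyGetD acc (-1) ""]) suffixes
    -- suffixes.reverse()
    let suffixes := suffixes.reverse
    -- clauses = ['(' + suffixes[0] + ')', '(' + suffixes[1] + ')']
    let clauses : List String :=
      ["(" ++ PySem.List.pyGetD suffixes 0 "" ++ ")",
       "(" ++ PySem.List.pyGetD suffixes 1 "" ++ ")"]
    -- prefix = st[0]
    -- for i in range(1, len(st) - 1): clauses.append('(' + prefix + '&' + suffixes[i+1] + ')'); prefix = prefix + '&' + st[i]
    let res := (PySem.List.pyRange 1 ((st.length : Int) - 1)).foldl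
      (fun (s : List String × String) i =>
        (s.1 ++ ["(" ++ s.2 ++ "&" ++ PySem.List.pyGetD suffixes (i + 1) "" ++ ")"],
         s.2 ++ "&" ++ PySem.List.pyGetD st i ""))
      (clauses, PySem.List.pyGetD st 0 "")
    -- clauses.append('(' + prefix + ')'); return '|'.join(clauses)
    PySem.Str.join "|" (res.1 ++ ["(" ++ res.2 ++ ")"])

-- ===== PRECONDITION & SPEC =====
def Spec_nl_phrase_search_py (terms : List String) (table : String) (constraints : String) (extra_constraints_tables : List String) (out : String) : Prop := out = nl_phrase_search_py_alt terms table constraints extra_constraints_tables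
instance (terms : List String) (table : String) (constraints : String) (extra_constraints_tables : List String) (out : String) : Decidable (Spec_nl_phrase_search_py terms table constraints extra_constraints_tables out) := by unfold Spec_nl_phrase_search_py; infer_instance

-- ===== CLAIM (what is proved, stated in full; the proofs are below) =====
def Claim_equal_nl_phrase_search_py : Prop := ∀ (terms : List String) (table : String) (constraints : String) (extra_constraints_tables : List String), Dom_nl_phrase_search_py terms table constraints extra_constraints_tables → Spec_nl_phrase_search_py terms table constraints extra_constraints_tables (nl_phrase_search_py terms table constraints extra_constraints_tables)

-- ===== LEMMAS AND PROOFS =====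

-- String-level restatements of the PySem.Chars join equations.
lemma str_join_cons2 (sep x q : String) (rest : List String) :
    PySem.Str.join sep (x :: q :: rest) = x ++ sep ++ PySem.Str.join sep (q :: rest) := by
  apply String.toList_inj.mp
  simp [PySem.Str.toList_join, PySem.Chars.join_cons_cons]

lemma str_join_one (sep x : String) : PySem.Str.join sep [x] = x := by
  apply String.toList_inj.mp
  simp [PySem.Str.toList_join, PySem.Chars.join_singleton]

lemma str_join_cons_ne (sep x : String) (l : List String) (h : l ≠ []) :
    PySem.Str.join sep (x :: l) = x ++ sep ++ PySem.Str.join sep l := by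
  cases l with
  | nil => exact absurd rfl h
  | cons q rest => exact str_join_cons2 sep x q rest

lemma str_join_append (sep : String) (xs ys : List String) (hx : xs ≠ []) (hy : ys ≠ []) :
    PySem.Str.join sep (xs ++ ys) = PySem.Str.join sep xs ++ sep ++ PySem.Str.join sep ys := by
  induction xs with
  | nil => exact absurd rfl hx
  | cons x xs ih =>
    cases xs with
    | nil => simp [str_join_cons_ne sep x ys hy, str_join_one]
    | cons q rest =>
      rw [List.cons_append, str_join_cons_ne sep x ((q :: rest) ++ ys) (by simp),
        ih (by simp), str_join_cons2 sep x q rest]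
      apply String.toList_inj.mp
      simp

lemma str_join_snoc (sep : String) (l : List String) (x : String) (h : l ≠ []) :
    PySem.Str.join sep (l ++ [x]) = PySem.Str.join sep l ++ sep ++ x := by
  rw [str_join_append sep l [x] h (by simp), str_join_one]

-- xs[-1] on a list with explicit last element.
lemma pyGetD_snoc_neg_one (l : List String) (x d : String) :
    PySem.List.pyGetD (l ++ [x]) (-1) d = x := by
  simp [PySem.List.pyGetD, PySem.List.pyGet?, PySem.List.pyIdx?]

-- A's discard loop, generalised: with the first `acc.length` groups already settled and the
-- remaining groups all equal to `s`, the enumerate-fold turns each remaining group `pos + 1`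
-- into `s` minus the corresponding term of `l`.
lemma groups_fold (l : List String) (s : PySem.Set String) :
    ∀ (acc : List (PySem.Set String)) (k : Int), k + 1 = (acc.length : Int) →
    (PySem.List.enumerate l k).foldl
        (fun gs pt =>
          PySem.List.pySetD gs (pt.1 + 1)
            (PySem.Set.discard (PySem.List.pyGetD gs (pt.1 + 1) []) pt.2))
        (acc ++ List.replicate l.length s)
      = acc ++ l.map (fun x => PySem.Set.discard s x) := by
  induction l with
  | nil => intro acc k _; simp [PySem.List.enumerate]
  | cons x xs ih =>
    intro acc k hk
    rw [PySem.List.enumerate_cons, List.foldl_cons]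
    have hlen : List.replicate (x :: xs).length s = s :: List.replicate xs.length s := rfl
    have hk' : k + 1 = ((acc.length : Nat) : Int) := hk
    have hget : PySem.List.pyGetD (acc ++ List.replicate (x :: xs).length s) (k + 1) [] = s := by
      rw [hk', PySem.List.pyGetD_natCast, hlen]
      simp [List.getD]
    have hset : PySem.List.pySetD (acc ++ List.replicate (x :: xs).length s) (k + 1)
        (PySem.Set.discard s x)
        = (acc ++ [PySem.Set.discard s x]) ++ List.replicate xs.length s := by
      rw [hk', PySem.List.pySetD_natCast, hlen]
      rw [List.set_append_right _ _ (Nat.le_refl acc.length)]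
      simp
    rw [hget, hset]
    have := ih (acc ++ [PySem.Set.discard s x]) (k + 1) (by simp; omega)
    rw [this]
    simp

-- `sorted(set(...) minus its i-th sorted element)` is the sorted list with that element removed.
lemma sorted_discard_eq_eraseIdx (terms : List String) (i : Nat)
    (hi : i < (PySem.List.sorted (PySem.Set.ofList terms) (fun x => x)).length) :
    PySem.List.sorted
        (PySem.Set.discard (PySem.Set.ofList terms)
          (PySem.List.sorted (PySem.Set.ofList terms) (fun x => x))[i]) (fun x => x)
      = (PySem.List.sorted (PySem.Set.ofList terms) (fun x => x)).eraseIdx i := by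
  set st := PySem.List.sorted (PySem.Set.ofList terms) (fun x => x) with hst
  have hnd : st.Nodup := (PySem.List.sorted_perm _ _ _).nodup_iff.mpr (PySem.Set.nodup_ofList terms)
  have hpw : st.Pairwise (· < ·) := PySem.List.sorted_ofList_pairwise_lt terms
  apply PySem.List.sorted_eq_of_perm_of_pairwise_lt
  · have h1 : st.eraseIdx i = st.erase st[i] := (List.Nodup.erase_getElem hnd i hi).symm
    have h2 : st.erase st[i] = st.filter (fun y => !(y == st[i])) := List.Nodup.erase_eq_filter hnd _
    rw [h1, h2]
    exact ((PySem.List.sorted_perm _ _ _).filter _)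
  · exact List.Pairwise.sublist (List.eraseIdx_sublist st i) hpw

-- B's backward suffix loop: starting from the last element and folding the remaining
-- elements back to front produces, in reverse, the '&'-joins of all suffixes.
lemma suffix_fold (p : List String) (z : String) :
    List.foldl (fun acc t => acc ++ [t ++ "&" ++ PySem.List.pyGetD acc (-1) ""]) [z] p.reverse
      = ((List.range (p.length + 1)).map
          (fun i => PySem.Str.join "&" ((p ++ [z]).drop i))).reverse := by
  induction p with
  | nil => simp [str_join_one]
  | cons w q ih =>
    rw [List.reverse_cons, List.foldl_append, ih, List.foldl_cons, List.foldl_nil]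
    have hsplit : (List.range (q.length + 1)).map
        (fun i => PySem.Str.join "&" ((q ++ [z]).drop i))
      = PySem.Str.join "&" (q ++ [z]) ::
        (List.range q.length).map (fun i => PySem.Str.join "&" ((q ++ [z]).drop (i + 1))) := by
      rw [List.range_succ_eq_map, List.map_cons, List.map_map]
      rfl
    have hlast : PySem.List.pyGetD
        (((List.range (q.length + 1)).map
          (fun i => PySem.Str.join "&" ((q ++ [z]).drop i))).reverse) (-1) ""
        = PySem.Str.join "&" (q ++ [z]) := by
      rw [hsplit, List.reverse_cons, pyGetD_snoc_neg_one]
    rw [hlast]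
    have hrange : (List.range ((w :: q).length + 1)).map
        (fun i => PySem.Str.join "&" (((w :: q) ++ [z]).drop i))
      = PySem.Str.join "&" (w :: (q ++ [z])) ::
        (List.range (q.length + 1)).map (fun i => PySem.Str.join "&" ((q ++ [z]).drop i)) := by
      show (List.range (q.length + 1 + 1)).map _ = _
      rw [List.range_succ_eq_map, List.map_cons, List.map_map]
      rfl
    rw [hrange, List.reverse_cons,
      str_join_cons_ne "&" w (q ++ [z]) (by simp)]

-- B's clause loop, generalised over the start index: with the prefix string equal to the
-- '&'-join of the first j terms, folding over range(j, j+m) appends one clause per index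
-- and leaves the prefix at the '&'-join of the first j+m terms.
lemma clause_fold (suffixes st : List String) :
    ∀ (m j : Nat) (cs : List String), 1 ≤ j → j + m + 1 ≤ st.length →
    List.foldl
        (fun (s : List String × String) i =>
          (s.1 ++ ["(" ++ s.2 ++ "&" ++ PySem.List.pyGetD suffixes (i + 1) "" ++ ")"],
           s.2 ++ "&" ++ PySem.List.pyGetD st i ""))
        (cs, PySem.Str.join "&" (st.take j)) (PySem.List.pyRange (j : Int) ((j + m : Nat) : Int))
      = (cs ++ (List.range' j m).map
          (fun i => "(" ++ PySem.Str.join "&" (st.take i) ++ "&"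
              ++ PySem.List.pyGetD suffixes ((i : Int) + 1) "" ++ ")"),
         PySem.Str.join "&" (st.take (j + m))) := by
  intro m
  induction m with
  | zero =>
    intro j cs _ _
    have : PySem.List.pyRange (j : Int) ((j + 0 : Nat) : Int) = [] := by
      simp [PySem.List.pyRange]
    rw [this]
    simp
  | succ m ih =>
    intro j cs _ hlen
    have hlt : (j : Int) < ((j + (m + 1) : Nat) : Int) := by push_cast; omega
    rw [PySem.List.pyRange_one_cons hlt, List.foldl_cons]
    have hjlt : j < st.length := by omega
    have hgetj : PySem.List.pyGetD st (j : Int) "" = st[j] := by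
      rw [PySem.List.pyGetD_natCast, List.getD_eq_getElem st "" hjlt]
    have htk : List.take j st ≠ [] :=
      List.ne_nil_of_length_pos (by rw [List.length_take]; omega)
    have hpref : PySem.Str.join "&" (st.take j) ++ "&" ++ PySem.List.pyGetD st (j : Int) ""
        = PySem.Str.join "&" (st.take (j + 1)) := by
      rw [hgetj, List.take_succ, List.getElem?_eq_getElem hjlt]
      simp only [Option.toList_some]
      rw [str_join_snoc "&" _ _ htk]
    have hcast1 : ((j : Int) + 1) = (((j + 1 : Nat)) : Int) := by push_cast; ring
    have hcast2 : ((j + (m + 1) : Nat) : Int) = (((j + 1) + m : Nat) : Int) := by push_cast; ring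
    rw [hpref]
    rw [hcast1, hcast2]  -- align the remaining range with the induction hypothesis
    rw [ih (j + 1) _ (by omega) (by omega)]
    have hr : List.range' j (m + 1) = j :: List.range' (j + 1) m := rfl
    rw [hr, List.map_cons]
    have hjm : (j + 1) + m = j + (m + 1) := by omega
    rw [hjm]
    simp

-- ===== VERDICT (by name: the statement is the Claim_ definition above) =====
theorem nl_phrase_search_py_spec : Claim_equal_nl_phrase_search_py := by
  intro terms table constraints ects _
  unfold Spec_nl_phrase_search_py nl_phrase_search_py nl_phrase_search_py_alt
  simp only []
  set s : PySem.Set String := PySem.Set.ofList terms with hs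
  set st := PySem.List.sorted s (fun x => x) with hst
  have hlen : st.length = s.length := PySem.List.length_sorted _ _ _
  have hcond : (PySem.Set.len s < 3) = ((st.length : Int) < 3) := by
    simp [PySem.Set.len, hlen]
  simp only [hcond]
  by_cases h3 : (st.length : Int) < 3
  · simp [h3]
  · simp only [h3, if_false]
    obtain ⟨m, hm⟩ : ∃ m, st.length = m + 3 := ⟨st.length - 3, by omega⟩
    have hne : st ≠ [] := by
      intro h; rw [h] at hm; simp at hm
    -- ---- A's side: the groups after the discard loop ----
    have hgroups :
        (PySem.List.enumerate st).foldl
            (fun gs pt =>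
              PySem.List.pySetD gs (pt.1 + 1)
                (PySem.Set.discard (PySem.List.pyGetD gs (pt.1 + 1) []) pt.2))
            (List.replicate (s.length + 1) s)
          = s :: st.map (fun x => PySem.Set.discard s x) := by
      have : List.replicate (s.length + 1) s = [s] ++ List.replicate st.length s := by
        rw [hlen]; rfl
      rw [this]
      exact groups_fold st s [s] 0 (by simp)
    rw [hgroups]
    -- ---- B's side: the suffix list ----
    have hsl : PySem.List.slice st none (some (-1)) = st.dropLast := by
      simp [PySem.List.slice, List.dropLast_eq_take]
    have hlast : PySem.List.pyGetD st (-1) "" = st.getLast hne := by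
      conv_lhs => rw [← List.dropLast_append_getLast hne]
      exact pyGetD_snoc_neg_one _ _ _
    rw [hsl, hlast]
    have hdl : st.dropLast ++ [st.getLast hne] = st := List.dropLast_append_getLast hne
    have hdllen : st.dropLast.length + 1 = st.length := by
      rw [List.length_dropLast]; omega
    have hsuff :
        List.foldl (fun acc t => acc ++ [t ++ "&" ++ PySem.List.pyGetD acc (-1) ""])
            [st.getLast hne] st.dropLast.reverse
          = ((List.range st.length).map
              (fun i => PySem.Str.join "&" (st.drop i))).reverse := by
      rw [suffix_fold st.dropLast (st.getLast hne), hdllen]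
      simp only [hdl]
    rw [hsuff, List.reverse_reverse]
    set f : Nat → String := fun i => PySem.Str.join "&" (st.drop i) with hf
    -- indexed reads of the suffix list
    have hsget : ∀ (k : Nat), k < st.length →
        PySem.List.pyGetD ((List.range st.length).map f) ((k : Nat) : Int) "" = f k := by
      intro k hk
      rw [PySem.List.pyGetD_natCast]
      exact PySem.List.getD_map_range f st.length k "" hk
    have hs0 : PySem.List.pyGetD ((List.range st.length).map f) 0 "" = f 0 := by
      rw [PySem.List.pyGetD_ofNat']
      exact PySem.List.getD_map_range f st.length 0 "" (by omega)
    have hs1 : PySem.List.pyGetD ((List.range st.length).map f) 1 "" = f 1 := by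
      rw [PySem.List.pyGetD_ofNat']
      exact PySem.List.getD_map_range f st.length 1 "" (by omega)
    rw [hs0, hs1]
    -- the initial prefix is the join of the first term
    have hp0 : PySem.List.pyGetD st 0 "" = PySem.Str.join "&" (st.take 1) := by
      obtain ⟨a, t, hat⟩ := List.exists_cons_of_ne_nil hne
      rw [hat, PySem.List.pyGetD_ofNat']
      simp [str_join_one]
    rw [hp0]
    -- the clause loop in closed form
    have hcf := clause_fold ((List.range st.length).map f) st (m + 1) 1
      ["(" ++ f 0 ++ ")", "(" ++ f 1 ++ ")"] (by omega) (by omega)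
    have e1 : (((1 : Nat)) : Int) = (1 : Int) := by norm_num
    have e2 : (((1 + (m + 1) : Nat)) : Int) = (st.length : Int) - 1 := by
      rw [hm]; push_cast; ring
    rw [e1, e2] at hcf
    rw [hcf]
    -- both results are '|'-joins; compare the clause lists
    apply congrArg (PySem.Str.join "|")
    rw [List.map_cons, List.map_map]
    -- canonical form: one clause per erased index
    set h : Nat → String := fun i => "(" ++ PySem.Str.join "&" (st.eraseIdx i) ++ ")" with hh
    have hA : st.map ((fun g => "(" ++ PySem.Str.join "&"
          (PySem.List.sorted g (fun x => x)) ++ ")") ∘ (fun x => PySem.Set.discard s x))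
        = (List.range st.length).map h := by
      apply List.ext_getElem (by simp)
      intro i h1 h2
      simp only [List.getElem_map, List.getElem_range, Function.comp]
      exact congrArg (fun t => "(" ++ PySem.Str.join "&" t ++ ")")
        (sorted_discard_eq_eraseIdx terms i (by simp only [List.length_map] at h1; exact h1))
    rw [hA]
    -- head clause: the full group
    have hhead : ("(" ++ PySem.Str.join "&" st ++ ")") = "(" ++ f 0 ++ ")" := by
      simp [hf]
    -- split the canonical list to match B's three pieces
    have hrangesplit : List.range st.length = 0 :: (List.range' 1 (m + 1) ++ [m + 2]) := by
      rw [hm, List.range_eq_range']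
      have h1 : List.range' 0 (m + 3) = 0 :: List.range' 1 (m + 2) := rfl
      have h2 : 1 + 1 * (m + 1) = m + 2 := by omega
      rw [h1, List.range'_concat, h2]
    have hh0 : h 0 = "(" ++ f 1 ++ ")" := by
      simp only [hh, hf]
      rw [List.eraseIdx_zero, List.drop_one]
    have hhlast : h (m + 2) = "(" ++ PySem.Str.join "&" (st.take (1 + (m + 1))) ++ ")" := by
      simp only [hh]
      rw [List.eraseIdx_eq_take_drop_succ]
      have : st.drop (m + 2 + 1) = [] := by
        rw [List.drop_eq_nil_iff, hm]
      have h12 : 1 + (m + 1) = m + 2 := by omega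
      rw [this, List.append_nil, h12]
    have hmid : (List.range' 1 (m + 1)).map h
        = (List.range' 1 (m + 1)).map (fun i => "(" ++ PySem.Str.join "&" (st.take i) ++ "&"
            ++ PySem.List.pyGetD ((List.range st.length).map f) ((i : Int) + 1) "" ++ ")") := by
      apply List.map_congr_left
      intro i hi
      rw [List.mem_range'_1] at hi
      have hcast : ((i : Int) + 1) = (((i + 1 : Nat)) : Int) := by push_cast; ring
      rw [hcast, hsget (i + 1) (by omega)]
      simp only [hh, hf]
      rw [List.eraseIdx_eq_take_drop_succ]
      rw [str_join_append "&" (st.take i) (st.drop (i + 1))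
        (List.ne_nil_of_length_pos (by rw [List.length_take, hm]; omega))
        (by rw [Ne, List.drop_eq_nil_iff, hm]; omega)]
      apply String.toList_inj.mp
      simp
    rw [hrangesplit, List.map_cons, List.map_append, List.map_singleton, hh0, hhlast, hmid,
      hhead]
    simp
    intro a ha1 ha2
    rw [hrangesplit]
    simp
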